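-- pv_equiv track=rewrite | github.com/a-luna/vig-api | app/data/task_master/brooks_pitchfx.py | get_pitch_count_by_inning
-- ===== SOURCE A (Python) =====
-- from collections import OrderedDict, defaultdict
--
-- def get_pitch_count_by_inning(pitchfx_log):
--     unordered = defaultdict(int)
--     for pfx in pitchfx_log:
--         unordered[pfx["inning"]] += 1
--     pitch_count_by_inning = OrderedDict()
--     for k in sorted(unordered.keys()):
--         pitch_count_by_inning[k] = unordered[k]
--     return pitch_count_by_inning
-- ===== SOURCE B (Python) =====
-- from collections import OrderedDict
--
-- def get_pitch_count_by_inning(pitchfx_log):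
--     pitch_count_by_inning = OrderedDict()
--     for inning in sorted(pfx["inning"] for pfx in pitchfx_log):
--         pitch_count_by_inning[inning] = pitch_count_by_inning.get(inning, 0) + 1
--     return pitch_count_by_inning
-- ===== Notes on version B (the rewrite author's own statement) =====
-- stated objective: simpler
-- what changed: B sorts the inning values first, so a single counting pass into an OrderedDict already yields the keys in ascending order, replacing A's defaultdict-count plus separate key-sort-and-rebuild.
import Mathlib
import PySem

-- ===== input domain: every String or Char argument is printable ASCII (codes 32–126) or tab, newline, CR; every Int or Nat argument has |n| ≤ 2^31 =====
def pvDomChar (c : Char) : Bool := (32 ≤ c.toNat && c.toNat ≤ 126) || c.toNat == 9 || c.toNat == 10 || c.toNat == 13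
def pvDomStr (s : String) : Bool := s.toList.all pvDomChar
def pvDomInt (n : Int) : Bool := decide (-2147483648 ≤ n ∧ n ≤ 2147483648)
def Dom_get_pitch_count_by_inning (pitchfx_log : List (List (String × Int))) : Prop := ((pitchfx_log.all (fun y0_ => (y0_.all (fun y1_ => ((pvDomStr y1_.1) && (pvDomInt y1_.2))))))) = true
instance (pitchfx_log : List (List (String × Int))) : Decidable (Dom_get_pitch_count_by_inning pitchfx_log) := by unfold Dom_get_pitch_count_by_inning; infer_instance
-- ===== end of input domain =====

-- B sorts the inning values first and counts them in one pass into an ordered dict,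
-- instead of A's defaultdict count followed by a separate key sort and rebuild.
-- Pre_ excludes records without an "inning" key (Python KeyError in both versions);
-- the ports read the key with getD 0 there, which Pre_ makes unreachable.

-- ===== PORT A =====
def get_pitch_count_by_inning (pitchfx_log : List (List (String × Int))) : List (Int × Int) :=
  -- unordered = defaultdict(int); for pfx in pitchfx_log: unordered[pfx["inning"]] += 1
  let unordered : PySem.Dict Int Int :=
    pitchfx_log.foldl
      (fun d pfx => d.modify ((PySem.Dict.mk pfx).getD "inning" 0) 0 (· + 1))
      PySem.Dict.empty
  -- pitch_count_by_inning = OrderedDict(); for k in sorted(unordered.keys()): pitch_count_by_inning[k] = unordered[k]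
  let pitch_count_by_inning : PySem.Dict Int Int :=
    (PySem.List.sorted unordered.keys (fun k => k) false).foldl
      (fun acc k => acc.insert k (unordered.getD k 0))
      PySem.Dict.empty
  pitch_count_by_inning.items

-- ===== PORT B =====
def get_pitch_count_by_inning_alt (pitchfx_log : List (List (String × Int))) : List (Int × Int) :=
  -- for inning in sorted(pfx["inning"] for pfx in pitchfx_log): d[inning] = d.get(inning, 0) + 1
  let innings : List Int :=
    PySem.List.sorted (pitchfx_log.map (fun pfx => (PySem.Dict.mk pfx).getD "inning" 0))
      (fun i => i) false
  (innings.foldl (fun (d : PySem.Dict Int Int) i => d.insert i (d.getD i 0 + 1))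
    PySem.Dict.empty).items

-- ===== PRECONDITION & SPEC =====
-- Pre_: every record carries the "inning" key; otherwise the Python (both A and B) raises KeyError.
def Pre_get_pitch_count_by_inning (pitchfx_log : List (List (String × Int))) : Prop :=
  ∀ pfx ∈ pitchfx_log, (PySem.Dict.mk pfx).contains "inning" = true
instance (pitchfx_log : List (List (String × Int))) : Decidable (Pre_get_pitch_count_by_inning pitchfx_log) := by unfold Pre_get_pitch_count_by_inning; infer_instance

def pvWitness_get_pitch_count_by_inning : (List (List (String × Int))) :=
  [[("inning", 1)], [("inning", 3)], [("inning", 1)]]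

def Spec_get_pitch_count_by_inning (pitchfx_log : List (List (String × Int))) (out : List (Int × Int)) : Prop := out = get_pitch_count_by_inning_alt pitchfx_log
instance (pitchfx_log : List (List (String × Int))) (out : List (Int × Int)) : Decidable (Spec_get_pitch_count_by_inning pitchfx_log out) := by unfold Spec_get_pitch_count_by_inning; infer_instance

-- ===== CLAIM (what is proved, stated in full; the proofs are below) =====
def Claim_equal_get_pitch_count_by_inning : Prop := ∀ (pitchfx_log : List (List (String × Int))), Dom_get_pitch_count_by_inning pitchfx_log → Pre_get_pitch_count_by_inning pitchfx_log → Spec_get_pitch_count_by_inning pitchfx_log (get_pitch_count_by_inning pitchfx_log)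

-- ===== LEMMAS AND PROOFS =====

-- dedup of a ≤-sorted Int list is strictly increasing
theorem pv_ofList_pairwise_lt (l : List Int) (h : l.Pairwise (· ≤ ·)) :
    (PySem.Set.ofList l).Pairwise (· < ·) := by
  induction l with
  | nil => simp [PySem.Set.ofList_nil]
  | cons a t ih =>
    rcases List.pairwise_cons.mp h with ⟨ha, ht⟩
    rw [PySem.Set.ofList_cons]
    refine List.pairwise_cons.mpr ⟨?_, ?_⟩
    · intro b hb
      rcases (PySem.Set.mem_discard _ _ _).mp hb with ⟨hbm, hbne⟩
      exact lt_of_le_of_ne (ha b ((PySem.Set.mem_ofList _ _).mp hbm)) (Ne.symm hbne)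
    · simpa only [PySem.Set.discard] using List.Pairwise.filter _ (ih ht)

-- the two ports agree on every input
theorem pv_key_both (pitchfx_log : List (List (String × Int))) :
    get_pitch_count_by_inning pitchfx_log = get_pitch_count_by_inning_alt pitchfx_log := by
  have hcnt :
      pitchfx_log.foldl
        (fun (d : PySem.Dict Int Int) pfx =>
          d.modify ((PySem.Dict.mk pfx).getD "inning" 0) 0 (· + 1)) PySem.Dict.empty
      = PySem.Dict.counter
          (pitchfx_log.map (fun pfx => (PySem.Dict.mk pfx).getD "inning" 0)) := by
    rw [PySem.Dict.counter_eq_foldl, List.foldl_map]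
  simp only [get_pitch_count_by_inning, get_pitch_count_by_inning_alt, hcnt,
    PySem.Dict.keys_counter, PySem.Dict.foldl_insert_getD_add_one_eq_counter,
    PySem.Dict.items_counter]
  set xs := pitchfx_log.map (fun pfx => (PySem.Dict.mk pfx).getD "inning" 0) with hxs
  set ys := PySem.List.sorted xs (fun i => i) false with hys
  have hks : PySem.List.sorted (PySem.Set.ofList xs) (fun k => k) false
      = PySem.Set.ofList ys := by
    apply PySem.List.sorted_eq_of_perm_of_pairwise_lt
    · exact (List.perm_ext_iff_of_nodup (PySem.Set.nodup_ofList _)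
        (PySem.Set.nodup_ofList _)).mpr
        (fun a => by
          rw [PySem.Set.mem_ofList, PySem.Set.mem_ofList, hys,
            PySem.List.mem_sorted])
    · exact pv_ofList_pairwise_lt ys (PySem.List.sorted_pairwise xs (fun i => i))
  have hnod : (PySem.List.sorted (PySem.Set.ofList xs) (fun k => k) false).Nodup := by
    rw [hks]; exact PySem.Set.nodup_ofList _
  rw [PySem.Dict.items_foldl_insert_fresh _ (fun k => k)
      (fun k => (PySem.Dict.counter xs).getD k 0) PySem.Dict.empty
      (fun a _ => PySem.Dict.contains_empty a)
      (by simpa using hnod), hks,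
    show (PySem.Dict.empty : PySem.Dict Int Int).items = [] from rfl, List.nil_append]
  refine List.map_congr_left (fun a _ => ?_)
  rw [PySem.Dict.getD_counter,
    ((PySem.List.sorted_perm xs (fun i => i) false).count_eq a).symm]

-- ===== VERDICT (by name: the statement is the Claim_ definition above) =====
theorem get_pitch_count_by_inning_spec : Claim_equal_get_pitch_count_by_inning := by
  intro log _ _
  exact pv_key_both log
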